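-- pv_equiv track=rewrite | github.com/marcianoo21/thesis | context_creation_only_words.py | create_context_from_keywords
-- ===== SOURCE A (Python) =====
-- PRIORITY = {
--     "name_intro": 0,  # Dodany priorytet dla samego przedstawienia miejsca
--     "types": 1,
--     "offerings": 2,
--     "specials": 3,
--     "atmosphere": 4,
--     "accessibility": 5,
--     "amenities": 6,
--     "crowd": 7,
--     "popular_for": 8,
--     "service_options": 9,
--     "parking": 10,
--     "children": 11,
-- }
--
-- MAX_CONTEXT_LEN = 800
--
-- def create_context_from_keywords(name, keywords_data):
--     """
--     Tworzy ciąg tekstowy (kontekst) z podanych słów kluczowych,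
--     używając priorytetów do uporządkowania informacji.
--     """
--     def join_list(values):
--         if not isinstance(values, list) or not values:
--             return None
--         # Ograniczamy liczbę wartości, aby uniknąć zbyt długich ciągów
--         shortened_values = values[:8]
--         return ", ".join(shortened_values)
--
--     components = {}
--
--     # Zaczynamy od nazwy miejsca
--     components['name_intro'] = f"Miejsce o nazwie {name}."
--
--     # Przetwarzamy dostępne słowa kluczowe
--     keyword_map = {
--         'types': "To miejsce typu: {}.",
--         'offerings': "W ofercie znajduje się: {}.",
--         'specials': "Specjalne cechy miejsca: {}.",
--         'atmosphere': "Atmosfera jest opisywana jako: {}.",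
--         'amenities': "Dostępne udogodnienia to: {}.",
--         'popular_for': "Jest popularne szczególnie na: {}.",
--         'crowd': "Typowa grupa odwiedzających: {}.",
--         'accessibility': "Miejsce oferuje udogodnienia dostępności: {}."
--     }
--
--     for key, template in keyword_map.items():
--         if key in keywords_data:
--             text_values = join_list(keywords_data.get(key))
--             if text_values:
--                 components[key] = template.format(text_values)
--
--     # Porządkujemy komponenty zgodnie z priorytetem
--     ordered_keys = sorted(components.keys(), key=lambda k: PRIORITY.get(k, 999))
--     ordered_parts = [components[k] for k in ordered_keys if components.get(k)]
--
--     text = ' '.join(ordered_parts)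
--
--     # Przycinamy tekst, jeśli jest za długi
--     if MAX_CONTEXT_LEN and len(text) > MAX_CONTEXT_LEN:
--         text = text[:MAX_CONTEXT_LEN - 3].rstrip() + '...'
--
--     return text
-- ===== SOURCE B (Python) =====
-- MAX_CONTEXT_LEN = 800
--
-- # (key, template) pairs already in PRIORITY order: the intro is emitted first,
-- # then each present key appends its formatted sentence in one ordered pass.
-- _TEMPLATES = [
--     ("types", "To miejsce typu: {}."),
--     ("offerings", "W ofercie znajduje się: {}."),
--     ("specials", "Specjalne cechy miejsca: {}."),
--     ("atmosphere", "Atmosfera jest opisywana jako: {}."),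
--     ("accessibility", "Miejsce oferuje udogodnienia dostępności: {}."),
--     ("amenities", "Dostępne udogodnienia to: {}."),
--     ("crowd", "Typowa grupa odwiedzających: {}."),
--     ("popular_for", "Jest popularne szczególnie na: {}."),
-- ]
--
-- def create_context_from_keywords(name, keywords_data):
--     parts = [f"Miejsce o nazwie {name}."]
--     for key, template in _TEMPLATES:
--         values = keywords_data.get(key)
--         if isinstance(values, list):
--             joined = ", ".join(values[:8])
--             if joined:
--                 parts.append(template.format(joined))
--     text = ' '.join(parts)
--     if len(text) > MAX_CONTEXT_LEN:
--         text = text[:MAX_CONTEXT_LEN - 3].rstrip() + '...'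
--     return text
-- ===== Notes on version B (the rewrite author's own statement) =====
-- stated objective: simpler
-- what changed: B replaces A's build-a-dict-then-sort-by-PRIORITY pipeline with a single ordered pass over one (key, template) list already in priority order, appending formatted sentences directly to the parts list; the components dict, the PRIORITY table and the sorted() step disappear.
import Mathlib
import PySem

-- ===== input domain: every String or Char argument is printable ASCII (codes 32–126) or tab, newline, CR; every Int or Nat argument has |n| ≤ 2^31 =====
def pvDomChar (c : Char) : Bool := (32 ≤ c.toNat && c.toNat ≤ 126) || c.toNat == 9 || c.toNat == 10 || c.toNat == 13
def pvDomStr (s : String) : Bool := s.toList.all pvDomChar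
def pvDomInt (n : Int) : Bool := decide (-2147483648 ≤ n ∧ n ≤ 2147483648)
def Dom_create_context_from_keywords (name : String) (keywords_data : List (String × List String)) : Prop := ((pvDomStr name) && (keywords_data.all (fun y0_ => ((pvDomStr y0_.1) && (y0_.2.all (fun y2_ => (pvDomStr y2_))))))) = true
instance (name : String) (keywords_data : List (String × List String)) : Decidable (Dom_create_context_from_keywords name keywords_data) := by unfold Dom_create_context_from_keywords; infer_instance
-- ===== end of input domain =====

-- B replaces A's build-a-components-dict-then-sort-by-PRIORITY pipeline with a single
-- pass over one (key, template) table already in priority order (objective: simpler).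

-- ===== PORT A =====
-- template.format(x): each template holds exactly one "{}"; ported exactly as prefix ++ x ++ suffix
def pvFmt (pre mid suf : String) : String := PySem.Str.join "" [pre, mid, suf]

def pvPRIORITY : List (String × Int) :=
  [("name_intro", 0), ("types", 1), ("offerings", 2), ("specials", 3), ("atmosphere", 4),
   ("accessibility", 5), ("amenities", 6), ("crowd", 7), ("popular_for", 8),
   ("service_options", 9), ("parking", 10), ("children", 11)]

-- join_list(values): the argument is keywords_data.get(key) (None when the key is absent;
-- under the type convention every present value is a list, so isinstance(values, list) holds)
def pvJoinList (values : Option (List String)) : Option String :=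
  match values with
  | none => none
  | some vs => if vs = [] then none
               else some (PySem.Str.join ", " (PySem.List.slice vs none (some 8)))

-- keyword_map, in A's dict-literal (= iteration) order; each template split at its "{}"
def pvKeywordMapA : List (String × String × String) :=
  [("types", "To miejsce typu: ", "."),
   ("offerings", "W ofercie znajduje się: ", "."),
   ("specials", "Specjalne cechy miejsca: ", "."),
   ("atmosphere", "Atmosfera jest opisywana jako: ", "."),
   ("amenities", "Dostępne udogodnienia to: ", "."),
   ("popular_for", "Jest popularne szczególnie na: ", "."),
   ("crowd", "Typowa grupa odwiedzających: ", "."),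
   ("accessibility", "Miejsce oferuje udogodnienia dostępności: ", ".")]

def create_context_from_keywords (name : String) (keywords_data : List (String × List String)) : String :=
  -- components = {'name_intro': f"Miejsce o nazwie {name}."}
  let components : PySem.Dict String String :=
    PySem.Dict.insert PySem.Dict.empty "name_intro" (pvFmt "Miejsce o nazwie " name ".")
  -- for key, template in keyword_map.items(): if key in keywords_data: …
  let components := pvKeywordMapA.foldl (fun comps kv =>
    if (keywords_data.lookup kv.1).isSome then
      match pvJoinList (keywords_data.lookup kv.1) with
      | some tv => if tv ≠ "" then comps.insert kv.1 (pvFmt kv.2.1 tv kv.2.2) else comps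
      | none => comps
    else comps) components
  -- ordered_keys = sorted(components.keys(), key=lambda k: PRIORITY.get(k, 999))
  let ordered_keys := PySem.List.sorted components.keys
    (fun k => PySem.Dict.getD (PySem.Dict.ofList pvPRIORITY) k 999) false
  -- ordered_parts = [components[k] for k in ordered_keys if components.get(k)]
  let ordered_parts := ordered_keys.filterMap (fun k =>
    match components.get? k with
    | some v => if v ≠ "" then some v else none
    | none => none)
  let text := PySem.Str.join " " ordered_parts
  if 800 < PySem.Str.len text
  then PySem.Str.join "" [PySem.Str.rstrip (PySem.Str.slice text none (some 797)), "..."]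
  else text

-- ===== PORT B =====
-- B's single template table, already in priority order
def pvTemplatesB : List (String × String × String) :=
  [("types", "To miejsce typu: ", "."),
   ("offerings", "W ofercie znajduje się: ", "."),
   ("specials", "Specjalne cechy miejsca: ", "."),
   ("atmosphere", "Atmosfera jest opisywana jako: ", "."),
   ("accessibility", "Miejsce oferuje udogodnienia dostępności: ", "."),
   ("amenities", "Dostępne udogodnienia to: ", "."),
   ("crowd", "Typowa grupa odwiedzających: ", "."),
   ("popular_for", "Jest popularne szczególnie na: ", ".")]

def create_context_from_keywords_alt (name : String) (keywords_data : List (String × List String)) : String :=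
  let parts := pvTemplatesB.foldl (fun acc kv =>
    match keywords_data.lookup kv.1 with
    | some values =>
      let joined := PySem.Str.join ", " (PySem.List.slice values none (some 8))
      if joined ≠ "" then acc ++ [pvFmt kv.2.1 joined kv.2.2] else acc
    | none => acc) [pvFmt "Miejsce o nazwie " name "."]
  let text := PySem.Str.join " " parts
  if 800 < PySem.Str.len text
  then PySem.Str.join "" [PySem.Str.rstrip (PySem.Str.slice text none (some 797)), "..."]
  else text

-- ===== PRECONDITION & SPEC =====
def Spec_create_context_from_keywords (name : String) (keywords_data : List (String × List String)) (out : String) : Prop := out = create_context_from_keywords_alt name keywords_data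
instance (name : String) (keywords_data : List (String × List String)) (out : String) : Decidable (Spec_create_context_from_keywords name keywords_data out) := by unfold Spec_create_context_from_keywords; infer_instance

-- ===== CLAIM (what is proved, stated in full; the proofs are below) =====
def Claim_equal_create_context_from_keywords : Prop := ∀ (name : String) (keywords_data : List (String × List String)), Dom_create_context_from_keywords name keywords_data → Spec_create_context_from_keywords name keywords_data (create_context_from_keywords name keywords_data)

-- ===== LEMMAS AND PROOFS =====

-- the per-key contribution both programs compute for a (key, template) entry
def pvContrib (kd : List (String × List String)) (kv : String × String × String) : Option String :=
  match kd.lookup kv.1 with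
  | some vs =>
    let j := PySem.Str.join ", " (PySem.List.slice vs none (some 8))
    if j ≠ "" then some (pvFmt kv.2.1 j kv.2.2) else none
  | none => none

def pvQ (kd : List (String × List String)) (kv : String × String × String) : Bool :=
  (pvContrib kd kv).isSome

def pvPrio (k : String) : Int := PySem.Dict.getD (PySem.Dict.ofList pvPRIORITY) k 999

theorem pvFmt_ne_empty (pre mid suf : String) (hp : pre ≠ "") : pvFmt pre mid suf ≠ "" := by
  intro he
  have h2 : (pvFmt pre mid suf).toList = pre.toList ++ mid.toList ++ suf.toList := by
    simp [pvFmt, PySem.Str.join, PySem.Chars.join, List.intercalate]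
  rw [he] at h2
  simp at h2
  exact hp h2.1

-- B's loop body, written through pvContrib
theorem pvStepB (kd : List (String × List String)) (acc : List String) (kv : String × String × String) :
    (match kd.lookup kv.1 with
      | some values =>
        let joined := PySem.Str.join ", " (PySem.List.slice values none (some 8))
        if joined ≠ "" then acc ++ [pvFmt kv.2.1 joined kv.2.2] else acc
      | none => acc)
    = match pvContrib kd kv with
      | some v => acc ++ [v]
      | none => acc := by
  cases h : kd.lookup kv.1 with
  | none => simp [pvContrib, h]
  | some vs =>
    by_cases hj : PySem.Str.join ", " (PySem.List.slice vs none (some 8)) = ""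
    · simp [pvContrib, h, hj]
    · simp [pvContrib, h, hj]

-- B's fold appends exactly the some-contributions, in table order
theorem pvFoldB (kd : List (String × List String)) :
    ∀ (l : List (String × String × String)) (init : List String),
    l.foldl (fun acc kv =>
      match kd.lookup kv.1 with
      | some values =>
        let joined := PySem.Str.join ", " (PySem.List.slice values none (some 8))
        if joined ≠ "" then acc ++ [pvFmt kv.2.1 joined kv.2.2] else acc
      | none => acc) init = init ++ l.filterMap (pvContrib kd) := by
  intro l
  induction l with
  | nil => intro init; simp
  | cons kv l ih =>
    intro init
    rw [List.foldl_cons, List.filterMap_cons]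
    show List.foldl _ (match kd.lookup kv.1 with
      | some values =>
        let joined := PySem.Str.join ", " (PySem.List.slice values none (some 8))
        if joined ≠ "" then init ++ [pvFmt kv.2.1 joined kv.2.2] else init
      | none => init) l = _
    rw [pvStepB kd init kv]
    cases hc : pvContrib kd kv with
    | none => rw [ih]
    | some v => rw [ih]; simp

-- A's loop body, written through pvContrib
theorem pvStepA (kd : List (String × List String)) (comps : PySem.Dict String String)
    (kv : String × String × String) :
    (if (kd.lookup kv.1).isSome then
      match pvJoinList (kd.lookup kv.1) with
      | some tv => if tv ≠ "" then comps.insert kv.1 (pvFmt kv.2.1 tv kv.2.2) else comps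
      | none => comps
    else comps)
    = match pvContrib kd kv with
      | some v => comps.insert kv.1 v
      | none => comps := by
  cases h : kd.lookup kv.1 with
  | none => simp [pvContrib, h]
  | some vs =>
    by_cases hv : vs = []
    · subst hv
      simp [pvContrib, pvJoinList, h]
      rfl
    · by_cases hj : PySem.Str.join ", " (PySem.List.slice vs none (some 8)) = ""
      · simp [pvContrib, pvJoinList, h, hv, hj]
      · simp [pvContrib, pvJoinList, h, hv, hj]

-- items of A's components after the fold: the intro entry followed by the contributions in map order
theorem pvFoldA_items (kd : List (String × List String)) :
    ∀ (l : List (String × String × String)) (comps : PySem.Dict String String),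
    (∀ kv ∈ l, comps.contains kv.1 = false) → l.Pairwise (fun a b => a.1 ≠ b.1) →
    (l.foldl (fun comps kv =>
      match pvContrib kd kv with
      | some v => comps.insert kv.1 v
      | none => comps) comps).items
      = comps.items ++ l.filterMap (fun kv => (pvContrib kd kv).map (fun v => (kv.1, v))) := by
  intro l
  induction l with
  | nil => intro comps _ _; simp
  | cons kv l ih =>
    intro comps hfresh hpw
    rw [List.foldl_cons, List.filterMap_cons]
    cases hc : pvContrib kd kv with
    | none =>
      dsimp only
      rw [ih comps (fun kv' h' => hfresh kv' (List.mem_cons_of_mem _ h')) hpw.of_cons]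
      rfl
    | some v =>
      dsimp only
      have hfresh' : ∀ kv' ∈ l, (comps.insert kv.1 v).contains kv'.1 = false := by
        intro kv' h'
        rw [PySem.Dict.contains_insert]
        have h1 : kv'.1 ≠ kv.1 := by
          have := (List.pairwise_cons.mp hpw).1 kv' h'
          exact fun he => this he.symm
        simp [h1, hfresh kv' (List.mem_cons_of_mem _ h')]
      rw [ih _ hfresh' hpw.of_cons,
          PySem.Dict.items_insert_of_not_contains comps v (hfresh kv (List.mem_cons_self))]
      simp

theorem pv_map_fst_filterMap {α β : Type} (f : α → Option β) (g : α → String) :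
    ∀ (l : List α),
    (l.filterMap (fun x => (f x).map (fun v => (g x, v)))).map Prod.fst
      = (l.filter (fun x => (f x).isSome)).map g := by
  intro l
  induction l with
  | nil => rfl
  | cons x l ih =>
    cases h : f x with
    | none => simp [h, ih]
    | some v => simp [h, ih]

theorem pv_filterMap_filter (kd : List (String × List String))
    (look : String → Option String)
    (hl : ∀ kv ∈ pvTemplatesB, ∀ v, pvContrib kd kv = some v → look kv.1 = some v) :
    (pvTemplatesB.filter (pvQ kd)).filterMap (fun kv => look kv.1)
      = pvTemplatesB.filterMap (pvContrib kd) := by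
  have main : ∀ (l : List (String × String × String)),
      (∀ kv ∈ l, ∀ v, pvContrib kd kv = some v → look kv.1 = some v) →
      (l.filter (pvQ kd)).filterMap (fun kv => look kv.1) = l.filterMap (pvContrib kd) := by
    intro l
    induction l with
    | nil => intro _; rfl
    | cons kv l ih =>
      intro h
      cases hc : pvContrib kd kv with
      | none =>
        have hq : pvQ kd kv = false := by simp [pvQ, hc]
        simp [hq, hc, ih (fun kv' h' => h kv' (List.mem_cons_of_mem _ h'))]
      | some v =>
        have hq : pvQ kd kv = true := by simp [pvQ, hc]
        simp [hq, hc, h kv List.mem_cons_self v hc,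
              ih (fun kv' h' => h kv' (List.mem_cons_of_mem _ h'))]
  exact main pvTemplatesB hl

-- A's ordered_parts equal the intro followed by B's contributions in priority order
theorem pvPartsA (kd : List (String × List String)) (intro : String) (hintro : intro ≠ "") :
    (PySem.List.sorted
      (pvKeywordMapA.foldl (fun comps kv =>
        match pvContrib kd kv with
        | some v => comps.insert kv.1 v
        | none => comps) (PySem.Dict.insert PySem.Dict.empty "name_intro" intro)).keys
      (fun k => PySem.Dict.getD (PySem.Dict.ofList pvPRIORITY) k 999) false).filterMap
      (fun k => match (pvKeywordMapA.foldl (fun comps kv =>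
        match pvContrib kd kv with
        | some v => comps.insert kv.1 v
        | none => comps) (PySem.Dict.insert PySem.Dict.empty "name_intro" intro)).get? k with
        | some v => if v ≠ "" then some v else none
        | none => none)
      = intro :: pvTemplatesB.filterMap (pvContrib kd) := by
  set C := pvKeywordMapA.foldl (fun comps kv =>
        match pvContrib kd kv with
        | some v => comps.insert kv.1 v
        | none => comps) (PySem.Dict.insert PySem.Dict.empty "name_intro" intro) with hC
  have h0c : ∀ kv ∈ pvKeywordMapA,
      (PySem.Dict.insert PySem.Dict.empty "name_intro" intro).contains kv.1 = false := by
    intro kv hkv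
    rw [PySem.Dict.contains_insert]
    have h1 : kv.1 ≠ "name_intro" := by fin_cases hkv <;> decide
    simp [h1]
  have h0i : (PySem.Dict.insert (PySem.Dict.empty (κ := String) (ν := String)) "name_intro" intro).items
      = [("name_intro", intro)] := by
    rw [PySem.Dict.items_insert_of_not_contains _ _ (PySem.Dict.contains_empty _)]
    rfl
  have hitems : C.items = ("name_intro", intro) ::
      pvKeywordMapA.filterMap (fun kv => (pvContrib kd kv).map (fun v => (kv.1, v))) := by
    rw [hC, pvFoldA_items kd pvKeywordMapA _ h0c (by decide), h0i]
    rfl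
  have hkeys : C.keys = "name_intro" :: (pvKeywordMapA.filter (pvQ kd)).map (·.1) := by
    have : C.keys = C.items.map Prod.fst := by simp [PySem.Dict.keys]
    rw [this, hitems]
    simp only [List.map_cons]
    rw [pv_map_fst_filterMap]
    rfl
  have hnodup : C.keys.Nodup := by
    rw [hkeys]
    have hsub : ((pvKeywordMapA.filter (pvQ kd)).map (·.1)).Sublist (pvKeywordMapA.map (·.1)) :=
      List.filter_sublist.map _
    refine List.Nodup.cons ?_ (List.Nodup.sublist hsub (by decide))
    intro hmem
    exact (by decide : "name_intro" ∉ pvKeywordMapA.map (·.1)) (hsub.subset hmem)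
  have hperm : pvTemplatesB.Perm pvKeywordMapA := by decide
  have hpermKeys : ("name_intro" :: (pvTemplatesB.filter (pvQ kd)).map (·.1)).Perm C.keys := by
    rw [hkeys]
    exact List.Perm.cons _ ((hperm.filter _).map _)
  have hpair : ("name_intro" :: (pvTemplatesB.filter (pvQ kd)).map (·.1)).Pairwise
      (fun a b => pvPrio a < pvPrio b) := by
    rw [List.pairwise_cons]
    constructor
    · intro b hb
      have hsubB : ((pvTemplatesB.filter (pvQ kd)).map (·.1)).Sublist (pvTemplatesB.map (·.1)) :=
        List.filter_sublist.map _
      exact (by decide : ∀ k ∈ pvTemplatesB.map (·.1), pvPrio "name_intro" < pvPrio k) b (hsubB.subset hb)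
    · exact List.pairwise_map.mpr
        (((by decide : pvTemplatesB.Pairwise (fun a b => pvPrio a.1 < pvPrio b.1))).filter _)
  have hsorted : PySem.List.sorted C.keys
      (fun k => PySem.Dict.getD (PySem.Dict.ofList pvPRIORITY) k 999) false
      = "name_intro" :: (pvTemplatesB.filter (pvQ kd)).map (·.1) :=
    PySem.List.sorted_eq_of_perm_of_pairwise_lt _ _ _ hpermKeys hpair
  rw [hsorted]
  rw [List.filterMap_cons]
  have hlook0 : C.get? "name_intro" = some intro :=
    PySem.Dict.get?_of_mem_items C (hitems ▸ List.mem_cons_self) hnodup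
  have hl : ∀ kv ∈ pvTemplatesB, ∀ v, pvContrib kd kv = some v →
      (match C.get? kv.1 with
        | some v => if v ≠ "" then some v else none
        | none => none) = some v := by
    intro kv hkv v hc
    have hvne : v ≠ "" := by
      have hpre : kv.2.1 ≠ "" := by fin_cases hkv <;> decide
      unfold pvContrib at hc
      cases h : kd.lookup kv.1 with
      | none => rw [h] at hc; exact absurd hc (by simp)
      | some vs =>
        rw [h] at hc
        by_cases hj : PySem.Str.join ", " (PySem.List.slice vs none (some 8)) = ""
        · simp [hj] at hc
        · simp at hc
          obtain ⟨-, hv⟩ := hc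
          rw [← hv]
          exact pvFmt_ne_empty _ _ _ hpre
    have hmem : (kv.1, v) ∈ C.items := by
      rw [hitems]
      exact List.mem_cons_of_mem _ (List.mem_filterMap.mpr
        ⟨kv, hperm.subset hkv, by rw [hc]; rfl⟩)
    have hg := PySem.Dict.get?_of_mem_items C hmem hnodup
    simp [hg, hvne]
  rw [hlook0]
  simp only [hintro, ne_eq, not_false_eq_true, if_true]
  rw [List.filterMap_map]
  exact congrArg (List.cons intro) (pv_filterMap_filter kd
    (fun k => match C.get? k with
      | some v => if v ≠ "" then some v else none
      | none => none) hl)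

-- ===== VERDICT (by name: the statement is the Claim_ definition above) =====
theorem create_context_from_keywords_spec : Claim_equal_create_context_from_keywords := by
  intro name keywords_data _
  unfold Spec_create_context_from_keywords
  unfold create_context_from_keywords create_context_from_keywords_alt
  dsimp only
  rw [pvFoldB keywords_data pvTemplatesB [pvFmt "Miejsce o nazwie " name "."]]
  have hbody : (fun (comps : PySem.Dict String String) (kv : String × String × String) =>
      if (keywords_data.lookup kv.1).isSome then
        match pvJoinList (keywords_data.lookup kv.1) with
        | some tv => if tv ≠ "" then comps.insert kv.1 (pvFmt kv.2.1 tv kv.2.2) else comps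
        | none => comps
      else comps)
      = (fun comps kv =>
        match pvContrib keywords_data kv with
        | some v => comps.insert kv.1 v
        | none => comps) :=
    funext fun c => funext fun kv => pvStepA keywords_data c kv
  rw [hbody]
  rw [pvPartsA keywords_data _ (pvFmt_ne_empty _ name _ (by decide))]
  rfl
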